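-- pv_equiv track=rewrite | github.com/bellringstar/python_study | algorithm/230210/1493.py | find_v
-- ===== SOURCE A (Python) =====
-- def stack():
--     i = 1 # 첫 원소
--     d = 2 # 다음 스택 첫 원소와의 차이
--     while True:
--         s = [i]
--         i += d
--         d += 1
--         yield s
--
-- def find_v(x, y):
--     s = stack()
--     d = x
--     for _ in range(x):
--         s1 = next(s)
--     for _ in range(y-1):
--         s1.append(s1[-1]+d)
--         d += 1
--     return s1[-1]
-- ===== SOURCE B (Python) =====
-- def find_v(x, y):
--     m = y - 1 if y > 1 else 0
--     return x * (x + 1) // 2 + m * x + m * (m - 1) // 2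
-- ===== Notes on version B (the rewrite author's own statement) =====
-- stated objective: faster
-- what changed: Replaced the two simulation loops (generator stepping x times, then y-1 appends) by the closed-form triangular-number formula x(x+1)/2 + (y-1)x + (y-1)(y-2)/2.
-- crash fix: For x <= 0 the first loop never runs, so A raises UnboundLocalError on the undefined s1; B returns the formula's value (e.g. 0 at (0, 1)). — e.g. on find_v(0, 1): A raises UnboundLocalError, B returns 0
import Mathlib
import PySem

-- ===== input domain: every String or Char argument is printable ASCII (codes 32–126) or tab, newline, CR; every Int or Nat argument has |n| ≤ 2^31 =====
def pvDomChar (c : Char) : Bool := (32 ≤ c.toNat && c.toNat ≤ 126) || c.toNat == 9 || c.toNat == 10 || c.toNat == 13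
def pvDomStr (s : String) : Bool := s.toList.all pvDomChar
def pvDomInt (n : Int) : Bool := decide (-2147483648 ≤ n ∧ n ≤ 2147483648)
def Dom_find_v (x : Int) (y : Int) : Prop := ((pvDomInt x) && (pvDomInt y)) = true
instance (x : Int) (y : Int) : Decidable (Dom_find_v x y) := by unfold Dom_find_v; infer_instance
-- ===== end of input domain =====

-- B replaces A's two simulation loops by the closed-form triangular-number formula (O(x+y) → O(1)).

-- ===== PORT A =====
-- literal port: the generator state is (i, d); 'next' yields [i] and advances the state;
-- s1 starts undefined (none), matching Python's unbound local for x ≤ 0 (excluded by Pre_,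
-- where the port returns the default 0).
def find_v (x : Int) (y : Int) : Int :=
  let st1 := (PySem.List.pyRange 0 x 1).foldl
      (fun (st : (Int × Int) × Option (List Int)) _ =>
        ((st.1.1 + st.1.2, st.1.2 + 1), some [st.1.1])) ((1, 2), none)
  match st1.2 with
  | none => 0
  | some s0 =>
      -- s1 is kept in REVERSED order, so that Python's O(1) 's1.append(..)' stays O(1)
      -- (append ↦ cons) and 's1[-1]' is the head; the values appended are identical.
      let st2 := (PySem.List.pyRange 0 (y - 1) 1).foldl
        (fun (st : List Int × Int) _ =>
          ((st.1.headD 0 + st.2) :: st.1, st.2 + 1)) (s0, x)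
      st2.1.headD 0

-- ===== PORT B =====
def find_v_alt (x : Int) (y : Int) : Int :=
  let m : Int := if 1 < y then y - 1 else 0
  PySem.Int.floordiv (x * (x + 1)) 2 + m * x + PySem.Int.floordiv (m * (m - 1)) 2

-- ===== PRECONDITION & SPEC =====
-- Pre_ excludes x ≤ 0, where Python's A raises UnboundLocalError (s1 is never assigned).
def Pre_find_v (x : Int) (y : Int) : Prop := 1 ≤ x
instance (x : Int) (y : Int) : Decidable (Pre_find_v x y) := by unfold Pre_find_v; infer_instance
def pvWitness_find_v : Int × Int := (3, 4)

-- For x ≤ 0 the first loop never runs, so A raises UnboundLocalError on the undefined s1;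
-- B returns the formula's value.
def Raises_find_v (x : Int) (y : Int) : Prop := x ≤ 0
instance (x : Int) (y : Int) : Decidable (Raises_find_v x y) := by unfold Raises_find_v; infer_instance
def pvRaiseWitness_find_v : Int × Int := (0, 1)
def pvRaiseWitnessOut_find_v : Int := 0

def Spec_find_v (x : Int) (y : Int) (out : Int) : Prop := out = find_v_alt x y
instance (x : Int) (y : Int) (out : Int) : Decidable (Spec_find_v x y out) := by unfold Spec_find_v; infer_instance

-- ===== CLAIM (what is proved, stated in full; the proofs are below) =====
def Claim_equal_find_v : Prop := ∀ (x : Int) (y : Int), Dom_find_v x y → Pre_find_v x y → Spec_find_v x y (find_v x y)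
def Claim_raises_find_v : Prop := (∀ (x : Int) (y : Int), Dom_find_v x y → Raises_find_v x y → ¬ Pre_find_v x y) ∧ (Dom_find_v (pvRaiseWitness_find_v.1) (pvRaiseWitness_find_v.2) ∧ Raises_find_v (pvRaiseWitness_find_v.1) (pvRaiseWitness_find_v.2) ∧ find_v_alt (pvRaiseWitness_find_v.1) (pvRaiseWitness_find_v.2) = pvRaiseWitnessOut_find_v)

-- ===== LEMMAS AND PROOFS =====

-- recursive triangular number: tri n = 0 + 1 + … + n
def tri : Nat → Int
  | 0 => 0
  | n + 1 => tri n + (n + 1)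

theorem tri_closed (n : Nat) :
    tri n = PySem.Int.floordiv ((n : Int) * ((n : Int) + 1)) 2 := by
  induction n with
  | zero => decide
  | succ k ih =>
      rw [PySem.Int.floordiv_eq_ediv_of_pos (by omega)] at ih ⊢
      have h : ((k + 1 : Nat) : Int) * (((k + 1 : Nat) : Int) + 1)
           = (k : Int) * ((k : Int) + 1) + ((k : Int) + 1) * 2 := by push_cast; ring
      rw [tri, h, Int.add_mul_ediv_right _ _ (by omega), ← ih]

-- first loop: after n ≥ 1 iterations the generator state is (tri (n+1), n+2) and s1 = [tri n]
theorem loop1_inv (n : Nat) :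
    (PySem.List.pyRange 0 (n : Int) 1).foldl
      (fun (st : (Int × Int) × Option (List Int)) _ =>
        ((st.1.1 + st.1.2, st.1.2 + 1), some [st.1.1])) ((1, 2), none)
    = ((tri (n + 1), (n : Int) + 2), if n = 0 then none else some [tri n]) := by
  induction n with
  | zero => decide
  | succ k ih =>
      rw [show ((k + 1 : Nat) : Int) = (k : Int) + 1 by push_cast; ring,
          PySem.List.pyRange_one_succ_right (by positivity), List.foldl_append, ih]
      simp only [List.foldl_cons, List.foldl_nil]
      simp only [Nat.succ_ne_zero, if_false]
      refine Prod.ext (Prod.ext ?_ ?_) ?_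
      · show tri (k + 1) + ((k : Nat) + 2 : Int) = tri (k + 2)
        simp [tri]; ring
      · push_cast; ring
      · cases k <;> simp [tri]

-- second loop: the (reversed) list's head grows by x + j at step j
theorem loop2_inv (m : Nat) (t x : Int) :
    ∃ s : List Int,
      (PySem.List.pyRange 0 (m : Int) 1).foldl
        (fun (st : List Int × Int) _ =>
          ((st.1.headD 0 + st.2) :: st.1, st.2 + 1)) ([t], x)
      = (s, x + m) ∧ s.headD 0 = t + m * x + tri m - m := by
  induction m with
  | zero =>
      exact ⟨[t], by simp [PySem.List.pyRange_one_eq_nil], by simp [tri]⟩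
  | succ k ih =>
      obtain ⟨s, hs, hlast⟩ := ih
      refine ⟨(s.headD 0 + (x + k)) :: s, ?_, ?_⟩
      · rw [show ((k + 1 : Nat) : Int) = (k : Int) + 1 by push_cast; ring,
            PySem.List.pyRange_one_succ_right (by positivity), List.foldl_append, hs]
        simp only [List.foldl_cons, List.foldl_nil]
        exact Prod.ext rfl (by push_cast; ring)
      · rw [List.headD_cons, hlast]
        push_cast [tri]; ring

theorem find_v_eq (x y : Int) (hx : 1 ≤ x) :
    find_v x y = tri x.toNat + (max (y - 1) 0) * x + tri (y - 1).toNat - (y - 1).toNat := by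
  have hxc : ((x.toNat : Nat) : Int) = x := Int.toNat_of_nonneg (by omega)
  have hn : x.toNat ≠ 0 := by omega
  unfold find_v
  rw [← hxc, loop1_inv]
  simp only [hn, if_false]
  by_cases hy : 1 < y
  · have hyc : (((y - 1).toNat : Nat) : Int) = y - 1 := Int.toNat_of_nonneg (by omega)
    obtain ⟨s, hs, hlast⟩ := loop2_inv (y - 1).toNat (tri x.toNat) ((x.toNat : Int))
    rw [← hyc, hs]
    simp only [hlast, hxc, hyc]
    have hm : max (y - 1) 0 = y - 1 := by omega
    rw [hm]
  · have h0 : (y - 1).toNat = 0 := by omega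
    have : PySem.List.pyRange 0 (y - 1) 1 = [] := PySem.List.pyRange_one_eq_nil (by omega)
    rw [this]
    simp only [List.foldl_nil, List.headD_cons]
    have hm : max (y - 1) 0 = 0 := by omega
    rw [h0, hm]
    simp [tri]
    congr 1
    omega

-- ===== VERDICT (by name: the statement is the Claim_ definition above) =====
theorem find_v_spec : Claim_equal_find_v := by
  intro x y _ hpre
  have hx : 1 ≤ x := hpre
  show find_v x y = find_v_alt x y
  rw [find_v_eq x y hx]
  unfold find_v_alt
  by_cases hy : 1 < y
  · have hyc : (((y - 1).toNat : Nat) : Int) = y - 1 := Int.toNat_of_nonneg (by omega)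
    have hm : max (y - 1) 0 = y - 1 := by omega
    simp only [if_pos hy, hm]
    rw [tri_closed x.toNat, tri_closed (y - 1).toNat,
        Int.toNat_of_nonneg (show (0:Int) ≤ x by omega), hyc]
    have h2 : PySem.Int.floordiv ((y - 1) * ((y - 1) + 1)) 2
            = PySem.Int.floordiv ((y - 1) * ((y - 1) - 1)) 2 + (y - 1) := by
      rw [PySem.Int.floordiv_eq_ediv_of_pos (by omega),
          PySem.Int.floordiv_eq_ediv_of_pos (by omega),
          show (y - 1) * ((y - 1) + 1) = (y - 1) * ((y - 1) - 1) + (y - 1) * 2 by ring,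
          Int.add_mul_ediv_right _ _ (by omega)]
    rw [h2]; ring
  · have h0 : (y - 1).toNat = 0 := by omega
    have hm : max (y - 1) 0 = 0 := by omega
    simp only [if_neg hy, hm, h0]
    rw [tri_closed x.toNat, Int.toNat_of_nonneg (show (0:Int) ≤ x by omega)]
    simp [tri]

def find_v_raises : Claim_raises_find_v := by
  unfold Claim_raises_find_v
  exact ⟨fun x y _ h => by unfold Raises_find_v at h; unfold Pre_find_v; omega, by decide⟩
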